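-- pv_equiv track=rewrite | github.com/roman-docktom434/Chimbai_Python | pz_9/PZ9_task9.py | parse_sales
-- ===== SOURCE A (Python) =====
-- def parse_sales(data):
--     parts = data.split()
--     products = {}
--     current_product = None
--     current_sales = []
--     for item in parts:
--         if item.isalpha():
--             if current_product:
--                 products[current_product] = current_sales
--             current_product = item
--             current_sales = []
--         else:
--             current_sales.append(int(item))
--     if current_product:
--         products[current_product] = current_sales
--     return products
-- ===== SOURCE B (Python) =====
-- def _segments(tokens):
--     # recursive descent: one (name, number-run) segment per call
--     if not tokens:
--         return []
--     name, rest = tokens[0], tokens[1:]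
--     k = 0
--     while k < len(rest) and not rest[k].isalpha():
--         k += 1
--     return [(name, [int(t) for t in rest[:k]])] + _segments(rest[k:])
--
--
-- def parse_sales(data):
--     tokens = data.split()
--     i = 0
--     while i < len(tokens) and not tokens[i].isalpha():
--         i += 1
--     return dict(_segments(tokens[i:]))
-- ===== Notes on version B (the rewrite author's own statement) =====
-- stated objective: alternative
-- what changed: B is a recursive-descent segmenter: it drops tokens before the first product name, recursively splits the stream into (name, number-run) segments by measuring each non-alpha prefix, and builds the dict from the finished pair list, replacing A's one-pass mutable state machine with a current-product buffer and two deferred flushes.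
import Mathlib
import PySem

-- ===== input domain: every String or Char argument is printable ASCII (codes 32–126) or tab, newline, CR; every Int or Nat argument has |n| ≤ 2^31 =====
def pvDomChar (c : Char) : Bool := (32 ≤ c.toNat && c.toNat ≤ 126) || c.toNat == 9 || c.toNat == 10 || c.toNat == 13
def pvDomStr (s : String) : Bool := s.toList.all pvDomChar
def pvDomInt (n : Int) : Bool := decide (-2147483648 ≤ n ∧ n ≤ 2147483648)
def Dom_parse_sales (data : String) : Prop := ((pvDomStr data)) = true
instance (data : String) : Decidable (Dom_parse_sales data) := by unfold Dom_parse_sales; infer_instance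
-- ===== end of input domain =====

-- B replaces A's one-pass mutable state machine (current product + buffered sales, two deferred
-- flushes) by a recursive-descent segmenter: drop tokens before the first name, recursively cut
-- the stream into (name, number-run) segments, then build the dict from the pair list.

-- ===== PORT A =====
-- State is (products, current_product, current_sales); `if current_product:` is the
-- Option match (split() tokens are never empty, so truthiness = is not None).
-- int(item) is (PySem.Int.ofStr? item).getD 0: Pre_ excludes the tokens where int() raises ValueError.
def parse_salesStepA (st : PySem.Dict String (List Int) × Option String × List Int)
    (item : String) : PySem.Dict String (List Int) × Option String × List Int :=
  let (products, current, sales) := st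
  if PySem.Str.strIsalpha item then
    (match current with
     | some c => products.insert c sales
     | none => products,
     some item, [])
  else
    (products, current, sales ++ [(PySem.Int.ofStr? item).getD 0])

def parse_sales (data : String) : List (String × List Int) :=
  let st := (PySem.Str.split₀ data).foldl parse_salesStepA (PySem.Dict.empty, none, [])
  match st.2.1 with
  | some c => (st.1.insert c st.2.2).items
  | none => st.1.items

-- ===== PORT B =====
-- int(t); Pre_ excludes the tokens where int() raises ValueError
def pvIntB (t : String) : Int := (PySem.Int.ofStr? t).getD 0

-- the `while k < len(rest) and not rest[k].isalpha(): k += 1` loop of _segments: the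
-- length of the leading non-alpha run
def psNumLen : List String → Nat
  | [] => 0
  | t :: rest => if PySem.Str.strIsalpha t then 0 else psNumLen rest + 1

-- _segments; rest[:k] / rest[k:] with 0 ≤ k ≤ len(rest) are List.take / List.drop
def psSegments : List String → List (String × List Int)
  | [] => []
  | name :: rest =>
      [(name, ((rest.take (psNumLen rest)).map pvIntB))] ++ psSegments (rest.drop (psNumLen rest))
termination_by l => l.length
decreasing_by simp [List.length_drop]

-- the `while i < ... and not tokens[i].isalpha(): i += 1` loop plus tokens[i:]
def psDropLead : List String → List String
  | [] => []
  | t :: rest => if PySem.Str.strIsalpha t then t :: rest else psDropLead rest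

def parse_sales_alt (data : String) : List (String × List Int) :=
  (PySem.Dict.ofList (psSegments (psDropLead (PySem.Str.split₀ data)))).items

-- ===== PRECONDITION & SPEC =====
-- Pre_ excludes exactly the inputs containing a token that is neither alphabetic nor a
-- valid int literal: there Python's int(item) raises ValueError in A.
def Pre_parse_sales (data : String) : Prop :=
  ∀ item ∈ PySem.Str.split₀ data,
    PySem.Str.strIsalpha item = true ∨ (PySem.Int.ofStr? item).isSome = true
instance (data : String) : Decidable (Pre_parse_sales data) := by unfold Pre_parse_sales; infer_instance

def pvWitness_parse_sales : String := "apple 1 2 banana -3"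

def Spec_parse_sales (data : String) (out : List (String × List Int)) : Prop := out = parse_sales_alt data
instance (data : String) (out : List (String × List Int)) : Decidable (Spec_parse_sales data out) := by unfold Spec_parse_sales; infer_instance

-- ===== CLAIM (what is proved, stated in full; the proofs are below) =====
def Claim_equal_parse_sales : Prop := ∀ (data : String), Dom_parse_sales data → Pre_parse_sales data → Spec_parse_sales data (parse_sales data)

-- ===== LEMMAS AND PROOFS =====

theorem psSegments_nil : psSegments [] = [] := by rw [psSegments.eq_def]

theorem psSegments_cons (name : String) (rest : List String) :
    psSegments (name :: rest) =
      (name, (rest.take (psNumLen rest)).map pvIntB) :: psSegments (rest.drop (psNumLen rest)) := by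
  rw [psSegments.eq_def]; rfl

-- A's final flush-and-read-out, as a function of the loop state
def psFinal (st : PySem.Dict String (List Int) × Option String × List Int) :
    List (String × List Int) :=
  match st.2.1 with
  | some c => (st.1.insert c st.2.2).items
  | none => st.1.items

-- while current_product is None, the buffered sales are dead state
theorem psA_none_sales (l : List String) (d : PySem.Dict String (List Int))
    (s1 s2 : List Int) :
    psFinal (l.foldl parse_salesStepA (d, none, s1)) =
      psFinal (l.foldl parse_salesStepA (d, none, s2)) := by
  induction l generalizing s1 s2 with
  | nil => rfl
  | cons t rest ih =>
    rw [List.foldl_cons, List.foldl_cons]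
    by_cases h : PySem.Chars.strIsalpha t.toList = true
    · have h1 : parse_salesStepA (d, none, s1) t = (d, some t, []) := by
        simp [parse_salesStepA, PySem.Str.strIsalpha, h]
      have h2 : parse_salesStepA (d, none, s2) t = (d, some t, []) := by
        simp [parse_salesStepA, PySem.Str.strIsalpha, h]
      rw [h1, h2]
    · have h1 : parse_salesStepA (d, none, s1) t = (d, none, s1 ++ [pvIntB t]) := by
        simp [parse_salesStepA, PySem.Str.strIsalpha, h, pvIntB]
      have h2 : parse_salesStepA (d, none, s2) t = (d, none, s2 ++ [pvIntB t]) := by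
        simp [parse_salesStepA, PySem.Str.strIsalpha, h, pvIntB]
      rw [h1, h2]
      exact ih _ _

-- tokens before the first alphabetic one do not affect A's result
theorem psA_dropLead (l : List String) (d : PySem.Dict String (List Int)) (s : List Int) :
    psFinal (l.foldl parse_salesStepA (d, none, s)) =
      psFinal ((psDropLead l).foldl parse_salesStepA (d, none, s)) := by
  induction l generalizing s with
  | nil => rfl
  | cons t rest ih =>
    by_cases h : PySem.Chars.strIsalpha t.toList = true
    · simp [psDropLead, PySem.Str.strIsalpha, h]
    · have hd : psDropLead (t :: rest) = psDropLead rest := by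
        simp [psDropLead, PySem.Str.strIsalpha, h]
      have hstep : parse_salesStepA (d, none, s) t = (d, none, s ++ [pvIntB t]) := by
        simp [parse_salesStepA, PySem.Str.strIsalpha, h, pvIntB]
      rw [hd, List.foldl_cons, hstep, psA_none_sales rest d _ s]
      exact ih s

-- the main invariant: with a current product c and buffered sales, the rest of A's loop
-- produces exactly B's segment list flushed into the dict
theorem psA_segments (rest : List String) (d : PySem.Dict String (List Int))
    (c : String) (sales : List Int) :
    psFinal (rest.foldl parse_salesStepA (d, some c, sales)) =
      (((c, sales ++ (rest.take (psNumLen rest)).map pvIntB)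
          :: psSegments (rest.drop (psNumLen rest))).foldl
        (fun d p => d.insert p.1 p.2) d).items := by
  induction rest generalizing d c sales with
  | nil => simp [psFinal, psNumLen, psSegments_nil]
  | cons t r ih =>
    rw [List.foldl_cons]
    by_cases h : PySem.Chars.strIsalpha t.toList = true
    · have hs : psNumLen (t :: r) = 0 := by
        simp [psNumLen, PySem.Str.strIsalpha, h]
      have hstep : parse_salesStepA (d, some c, sales) t = (d.insert c sales, some t, []) := by
        simp [parse_salesStepA, PySem.Str.strIsalpha, h]
      rw [hstep, ih, hs]
      simp only [List.take_zero, List.map_nil, List.append_nil, List.drop_zero]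
      rw [psSegments_cons]
      simp only [List.foldl_cons, List.nil_append]
    · have hs : psNumLen (t :: r) = psNumLen r + 1 := by
        simp [psNumLen, PySem.Str.strIsalpha, h]
      have hstep : parse_salesStepA (d, some c, sales) t
          = (d, some c, sales ++ [pvIntB t]) := by
        simp [parse_salesStepA, PySem.Str.strIsalpha, h, pvIntB]
      rw [hstep, ih, hs]
      simp only [List.take_succ_cons, List.drop_succ_cons, List.map_cons,
        List.append_assoc, List.singleton_append]

-- the first token after dropping the leading non-alpha run is alphabetic
theorem psDropLead_head (l : List String) (name : String) (rest : List String)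
    (h : psDropLead l = name :: rest) : PySem.Chars.strIsalpha name.toList = true := by
  induction l with
  | nil => cases h
  | cons t r ih =>
    by_cases ht : PySem.Chars.strIsalpha t.toList = true
    · simp only [psDropLead, PySem.Str.strIsalpha, ht, if_true] at h
      cases h
      exact ht
    · simp only [psDropLead, PySem.Str.strIsalpha, ht, Bool.false_eq_true, if_false] at h
      exact ih h

-- ===== VERDICT (by name: the statement is the Claim_ definition above) =====
theorem parse_sales_spec : Claim_equal_parse_sales := by
  intro data _ _
  unfold Spec_parse_sales parse_sales parse_sales_alt
  show psFinal ((PySem.Str.split₀ data).foldl parse_salesStepA (PySem.Dict.empty, none, [])) = _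
  rw [psA_dropLead]
  cases hl : psDropLead (PySem.Str.split₀ data) with
  | nil => rw [psSegments_nil]; rfl
  | cons name rest =>
    have halpha := psDropLead_head _ _ _ hl
    have hstep : parse_salesStepA (PySem.Dict.empty, none, []) name
        = (PySem.Dict.empty, some name, []) := by
      simp [parse_salesStepA, PySem.Str.strIsalpha, halpha]
    rw [List.foldl_cons, hstep, psA_segments, psSegments_cons]
    simp only [List.nil_append]
    rfl
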